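-- pv_equiv track=rewrite | github.com/Rubal0990/GFG-DSA | Killing Spree - GFG/killing-spree.py | killinSpree
-- ===== SOURCE A (Python) =====
-- def killinSpree (n):
--
--     def squareSeries(n):
--         return (n * (n+1) * (2 * n+1)) // 6
--
--     def maxPeople(n):
--         low = 0
--         high = 1000000000000000
--         while low <= high:
--             mid = low + ((high - low) // 2)
--             value = squareSeries(mid)
--             if value <= n:
--                 ans = mid
--                 low = mid + 1
--             else:
--                 high = mid - 1
--         return ans
--
--     return maxPeople(n)
-- ===== SOURCE B (Python) =====
-- def killinSpree(n):
--     def squareSeries(m):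
--         return (m * (m + 1) * (2 * m + 1)) // 6
--     m = 0
--     while squareSeries(m + 1) <= n:
--         m += 1
--     return m
-- ===== Notes on version B (the rewrite author's own statement) =====
-- stated objective: simpler
-- what changed: Replaced the fixed-range binary search (with its never-initialized ans variable) with a direct incremental scan that counts up while the next square-pyramidal number still fits.
import Mathlib
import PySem

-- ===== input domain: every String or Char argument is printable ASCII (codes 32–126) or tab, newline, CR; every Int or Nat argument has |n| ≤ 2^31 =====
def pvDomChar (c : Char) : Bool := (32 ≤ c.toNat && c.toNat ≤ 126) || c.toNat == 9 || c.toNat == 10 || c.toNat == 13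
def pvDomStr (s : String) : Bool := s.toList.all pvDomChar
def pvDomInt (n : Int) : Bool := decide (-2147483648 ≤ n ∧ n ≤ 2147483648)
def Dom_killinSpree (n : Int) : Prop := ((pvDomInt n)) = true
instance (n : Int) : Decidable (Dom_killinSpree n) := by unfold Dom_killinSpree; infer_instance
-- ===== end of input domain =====

-- B replaces A's fixed-range binary search with a simple incremental scan; return values proved
-- equal on all non-negative n (for negative n A raises UnboundLocalError, excluded by Pre_).

-- squareSeries helper shared by both Pythons (identical line in Source A and Source B)
def pySq (k : Int) : Int := PySem.Int.floordiv (k * (k + 1) * (2 * k + 1)) 6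

-- ===== PORT A =====
-- A's while-loop of maxPeople; `mid` is inlined (same expression, same value); `ans` starts
-- unassigned in Python, modelled as Option (none = unassigned; A raises there, excluded by Pre_).
-- `fuel` only makes the loop total: it starts at high+1-low and bounds the iteration count,
-- so the loop always terminates by its own `low > high` exit first.
def kloop (n : Int) (fuel : Nat) (low high : Int) (ans : Option Int) : Option Int :=
  match fuel with
  | 0 => ans
  | fuel + 1 =>
    if low ≤ high then
      if pySq (low + PySem.Int.floordiv (high - low) 2) ≤ n then
        kloop n fuel (low + PySem.Int.floordiv (high - low) 2 + 1) high
          (some (low + PySem.Int.floordiv (high - low) 2))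
      else
        kloop n fuel low (low + PySem.Int.floordiv (high - low) 2 - 1) ans
    else ans

def killinSpree (n : Int) : Int :=
  (kloop n 1000000000000001 0 1000000000000000 none).getD 0

-- ===== PORT B =====
-- Source B's while-loop; `fuel` only makes it total: m grows by 1 per step and m+1 ≤ squareSeries(m+1) ≤ n
-- inside the loop, so n+1 steps always reach the `squareSeries(m+1) > n` exit first.
def bloop (n : Int) (fuel : Nat) (m : Nat) : Int :=
  match fuel with
  | 0 => (m : Int)
  | fuel + 1 => if pySq ((m : Int) + 1) ≤ n then bloop n fuel (m + 1) else (m : Int)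

def killinSpree_alt (n : Int) : Int := bloop n (n + 1).toNat 0

-- ===== PRECONDITION & SPEC =====
-- Pre_ excludes negative n, where A's `ans` is never assigned and A raises UnboundLocalError (B returns 0 there).
def Pre_killinSpree (n : Int) : Prop := 0 ≤ n
instance (n : Int) : Decidable (Pre_killinSpree n) := by unfold Pre_killinSpree; infer_instance
def pvWitness_killinSpree : Int := 5

def Spec_killinSpree (n : Int) (out : Int) : Prop := out = killinSpree_alt n
instance (n : Int) (out : Int) : Decidable (Spec_killinSpree n out) := by unfold Spec_killinSpree; infer_instance

-- ===== CLAIM (what is proved, stated in full; the proofs are below) =====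
def Claim_equal_killinSpree : Prop := ∀ (n : Int), Dom_killinSpree n → Pre_killinSpree n → Spec_killinSpree n (killinSpree n)

-- ===== LEMMAS AND PROOFS =====

theorem pvMid_bounds (low high : Int) (h : low ≤ high) :
    low ≤ low + PySem.Int.floordiv (high - low) 2 ∧
      low + PySem.Int.floordiv (high - low) 2 ≤ high := by
  have e : low + PySem.Int.floordiv (high - low) 2 = PySem.Int.floordiv (low + high) 2 := by
    show low + (high - low).fdiv 2 = (low + high).fdiv 2
    have h2 := Int.add_mul_fdiv_right (high - low) low (show (2:Int) ≠ 0 by norm_num)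
    have e2 : high - low + low * 2 = low + high := by ring
    rw [e2] at h2; omega
  rw [e]; exact PySem.Int.floordiv_two_mid_bounds h

theorem pvLe_pySq (k : Int) (hk : 0 ≤ k) : k ≤ pySq k := by
  show k ≤ (k * (k + 1) * (2 * k + 1)).fdiv 6
  have h6 : k * 6 ≤ k * (k + 1) * (2 * k + 1) := by
    rcases (by omega : k = 0 ∨ 1 ≤ k) with h | h
    · simp [h]
    · nlinarith [mul_nonneg (mul_nonneg hk hk) hk, mul_le_mul_of_nonneg_left h hk]
  exact (PySem.Int.le_floordiv_iff_mul_le (a := k * (k + 1) * (2 * k + 1)) (b := 6)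
    (q := k) (by norm_num)).mpr h6

theorem pySq_succ (k : Int) : pySq (k + 1) = pySq k + (k + 1) ^ 2 := by
  show ((k+1) * ((k+1) + 1) * (2 * (k+1) + 1)).fdiv 6 = (k * (k+1) * (2*k+1)).fdiv 6 + (k+1)^2
  have e : (k+1) * ((k+1) + 1) * (2 * (k+1) + 1) = k * (k+1) * (2*k+1) + (k+1)^2 * 6 := by ring
  rw [e, Int.add_mul_fdiv_right _ _ (show (6:Int) ≠ 0 by norm_num)]

theorem pySq_mono_nat (d : Nat) : ∀ (a : Int), 0 ≤ a → pySq a ≤ pySq (a + d) := by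
  induction d with
  | zero => intro a _; simp
  | succ d ih =>
      intro a ha
      have e : (a + ((d : Nat) + 1 : Nat) : Int) = (a + d) + 1 := by push_cast; ring
      rw [e, pySq_succ]
      have := ih a ha
      nlinarith [sq_nonneg (a + (d : Int) + 1)]

theorem pySq_mono {a b : Int} (ha : 0 ≤ a) (hab : a ≤ b) : pySq a ≤ pySq b := by
  have e : b = a + ((b - a).toNat : Int) := by omega
  rw [e]; exact pySq_mono_nat _ a ha

theorem pySq_unique {n a b : Int} (ha : 0 ≤ a) (hb : 0 ≤ b)
    (h1 : pySq a ≤ n) (h2 : n < pySq (a + 1)) (h3 : pySq b ≤ n) (h4 : n < pySq (b + 1)) :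
    a = b := by
  rcases lt_trichotomy a b with h | h | h
  · have : pySq (a + 1) ≤ pySq b := pySq_mono (by omega) (by omega)
    omega
  · exact h
  · have : pySq (b + 1) ≤ pySq a := pySq_mono (by omega) (by omega)
    omega

theorem pySq_zero : pySq 0 = 0 := by decide
theorem pySq_neg_one : pySq (0 - 1) = 0 := by decide

theorem kloop_spec (n : Int) (hn : 0 ≤ n) :
    ∀ (fuel : Nat) (low high : Int) (ans : Option Int),
      (high + 1 - low).toNat ≤ fuel → 0 ≤ low → low ≤ high + 1 →
      pySq (low - 1) ≤ n → n < pySq (high + 1) →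
      ans = (if low = 0 then none else some (low - 1)) →
      ∃ r, kloop n fuel low high ans = some r ∧ 0 ≤ r ∧ pySq r ≤ n ∧ n < pySq (r + 1) := by
  intro fuel
  induction fuel with
  | zero =>
      intro low high ans hk h0 h1 h2 h3 h4
      rw [kloop]
      have hlow : low = high + 1 := by omega
      by_cases hz : low = 0
      · exfalso; rw [hz] at hlow; rw [← hlow, pySq_zero] at h3; omega
      · refine ⟨low - 1, ?_, by omega, h2, ?_⟩
        · rw [h4, if_neg hz]
        · have : low - 1 + 1 = high + 1 := by omega
          rw [this]; exact h3
  | succ fuel ih =>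
      intro low high ans hk h0 h1 h2 h3 h4
      by_cases hlh : low ≤ high
      · rw [kloop, if_pos hlh]
        have hb := pvMid_bounds low high hlh
        by_cases hv : pySq (low + PySem.Int.floordiv (high - low) 2) ≤ n
        · rw [if_pos hv]
          refine ih (low + PySem.Int.floordiv (high - low) 2 + 1) high _ (by omega) (by omega)
            (by omega) (by simpa using hv) h3 ?_
          rw [if_neg (by omega)]
          congr 1; omega
        · rw [if_neg hv]
          refine ih low (low + PySem.Int.floordiv (high - low) 2 - 1) ans (by omega) h0 (by omega)
            h2 ?_ h4
          have : low + PySem.Int.floordiv (high - low) 2 - 1 + 1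
              = low + PySem.Int.floordiv (high - low) 2 := by omega
          rw [this]; omega
      · rw [kloop, if_neg hlh]
        have hlow : low = high + 1 := by omega
        by_cases hz : low = 0
        · exfalso; rw [hz] at hlow; rw [← hlow, pySq_zero] at h3; omega
        · refine ⟨low - 1, ?_, by omega, h2, ?_⟩
          · rw [h4, if_neg hz]
          · have : low - 1 + 1 = high + 1 := by omega
            rw [this]; exact h3

theorem pySq_big : (2 : Int) ^ 31 < pySq (1000000000000000 + 1) := by decide

theorem bloop_spec (n : Int) :
    ∀ (fuel : Nat) (m : Nat), (n + 1 - m).toNat ≤ fuel → pySq (m : Int) ≤ n →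
      0 ≤ bloop n fuel m ∧ pySq (bloop n fuel m) ≤ n ∧ n < pySq (bloop n fuel m + 1) := by
  intro fuel
  induction fuel with
  | zero =>
      intro m hk hm
      rw [bloop]
      by_cases hc : pySq ((m : Int) + 1) ≤ n
      · exfalso
        have := pvLe_pySq ((m : Int) + 1) (by positivity)
        omega
      · exact ⟨by positivity, hm, by omega⟩
  | succ fuel ih =>
      intro m hk hm
      rw [bloop]
      by_cases hc : pySq ((m : Int) + 1) ≤ n
      · rw [if_pos hc]
        have hle := pvLe_pySq ((m : Int) + 1) (by positivity)
        exact ih (m + 1) (by push_cast; omega) (by push_cast; exact hc)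
      · rw [if_neg hc]
        exact ⟨by positivity, hm, by omega⟩

-- ===== VERDICT (by name: the statement is the Claim_ definition above) =====
theorem killinSpree_spec : Claim_equal_killinSpree := by
  intro n hdom hn
  have hn' : 0 ≤ n := hn
  have hbig : n < pySq (1000000000000000 + 1) := by
    have hd : n ≤ 2147483648 := (of_decide_eq_true hdom).2
    have := pySq_big
    norm_num at this ⊢
    omega
  obtain ⟨r, hr, hr0, hr1, hr2⟩ :=
    kloop_spec n hn' 1000000000000001 0 1000000000000000 none (by norm_num) (by norm_num)
      (by norm_num) (by rw [pySq_neg_one]; exact hn') hbig (by norm_num)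
  obtain ⟨hb0, hb1, hb2⟩ :=
    bloop_spec n (n + 1).toNat 0 (by omega) (by simpa [pySq_zero] using hn')
  have : r = bloop n (n + 1).toNat 0 := pySq_unique hr0 hb0 hr1 hr2 hb1 hb2
  show killinSpree n = killinSpree_alt n
  rw [killinSpree, killinSpree_alt, hr]
  simpa using this
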